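-- pv_equiv track=rewrite | github.com/1archit3ct1/orchestrator | SPAWN/STOP/web/app.py | get_active_task
-- ===== SOURCE A (Python) =====
-- def get_active_task(tasks):
--     for task in tasks:
--         if task.get("status") in {"active", "in_progress"}:
--             return task
--     for task in tasks:
--         if task.get("status") == "pending":
--             return task
--     return tasks[0] if tasks else None
-- ===== SOURCE B (Python) =====
-- def get_active_task(tasks):
--     first_pending = None
--     for task in tasks:
--         s = task.get("status")
--         if s in ("active", "in_progress"):
--             return task
--         if s == "pending" and first_pending is None:
--             first_pending = task
--     if first_pending is not None:
--         return first_pending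
--     return tasks[0] if tasks else None
-- ===== Notes on version B (the rewrite author's own statement) =====
-- stated objective: alternative
-- what changed: Replaced A's two sequential scans (first for active/in_progress, then for pending) with a single pass that returns immediately on an active task while carrying a first_pending accumulator.
import Mathlib
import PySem

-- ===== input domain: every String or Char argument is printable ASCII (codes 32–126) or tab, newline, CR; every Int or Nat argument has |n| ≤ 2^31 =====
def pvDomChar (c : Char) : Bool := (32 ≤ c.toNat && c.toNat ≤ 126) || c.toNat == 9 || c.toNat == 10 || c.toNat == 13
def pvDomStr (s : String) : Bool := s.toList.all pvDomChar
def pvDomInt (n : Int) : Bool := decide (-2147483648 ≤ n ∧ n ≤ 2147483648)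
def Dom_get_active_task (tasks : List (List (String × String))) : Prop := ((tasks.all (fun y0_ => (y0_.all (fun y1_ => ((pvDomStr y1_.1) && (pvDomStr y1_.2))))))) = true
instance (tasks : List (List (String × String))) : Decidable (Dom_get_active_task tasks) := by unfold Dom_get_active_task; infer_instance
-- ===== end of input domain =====

-- B collapses A's two sequential scans into one pass carrying a first_pending accumulator (alternative decomposition, same cost).

-- ===== PORT A =====
-- task.get("status") in {"active","in_progress"}  (dict.get returns None when missing; None is in neither set)
def pvIsActive (task : List (String × String)) : Bool :=
  (PySem.Dict.mk task).get? "status" == some "active" || (PySem.Dict.mk task).get? "status" == some "in_progress"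

def pvIsPending (task : List (String × String)) : Bool :=
  (PySem.Dict.mk task).get? "status" == some "pending"

def get_active_task (tasks : List (List (String × String))) : Option (List (String × String)) :=
  -- first loop: return the first active/in_progress task
  match tasks.find? pvIsActive with
  | some task => some task
  | none =>
    -- second loop: return the first pending task
    match tasks.find? pvIsPending with
    | some task => some task
    | none => tasks.head?   -- tasks[0] if tasks else None

-- ===== PORT B =====
-- single pass: return immediately on active/in_progress, carry the first pending task
def pvAltLoop (ts : List (List (String × String))) (firstPending : Option (List (String × String))) :
    Option (List (String × String)) :=
  match ts with
  | [] => firstPending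
  | task :: rest =>
    let s := (PySem.Dict.mk task).get? "status"
    if s == some "active" || s == some "in_progress" then some task
    else pvAltLoop rest (if s == some "pending" && firstPending.isNone then some task else firstPending)

def get_active_task_alt (tasks : List (List (String × String))) : Option (List (String × String)) :=
  match pvAltLoop tasks none with
  | some task => some task
  | none => tasks.head?

-- ===== PRECONDITION & SPEC =====
def Spec_get_active_task (tasks : List (List (String × String))) (out : Option (List (String × String))) : Prop := out = get_active_task_alt tasks
instance (tasks : List (List (String × String))) (out : Option (List (String × String))) : Decidable (Spec_get_active_task tasks out) := by unfold Spec_get_active_task; infer_instance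

-- ===== CLAIM (what is proved, stated in full; the proofs are below) =====
def Claim_equal_get_active_task : Prop := ∀ (tasks : List (List (String × String))), Dom_get_active_task tasks → Spec_get_active_task tasks (get_active_task tasks)

-- ===== LEMMAS AND PROOFS =====

theorem pvAltLoop_eq (ts : List (List (String × String))) (fp : Option (List (String × String))) :
    pvAltLoop ts fp =
      match ts.find? pvIsActive with
      | some t => some t
      | none =>
        match fp with
        | some p => some p
        | none => ts.find? pvIsPending := by
  induction ts generalizing fp with
  | nil => cases fp <;> simp [pvAltLoop]
  | cons t rest ih =>
    by_cases ha : pvIsActive t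
    · simp [pvAltLoop, pvIsActive] at ha ⊢
      rw [List.find?_cons_of_pos (by simpa [pvIsActive] using ha)]
      rcases ha with h | h <;> simp [h]
    · rw [pvAltLoop, List.find?_cons_of_neg ha]
      simp only [pvIsActive, Bool.or_eq_true, not_or] at ha
      rw [if_neg (by simp [ha.1, ha.2]), ih]
      cases fp with
      | some p => simp
      | none =>
        by_cases hp : pvIsPending t
        · rw [List.find?_cons_of_pos hp]
          simp [pvIsPending] at hp
          simp [hp]
        · rw [List.find?_cons_of_neg hp]
          simp only [pvIsPending] at hp
          simp [hp]

-- ===== VERDICT (by name: the statement is the Claim_ definition above) =====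
theorem get_active_task_spec : Claim_equal_get_active_task := by
  intro tasks _
  show get_active_task tasks = get_active_task_alt tasks
  unfold get_active_task get_active_task_alt
  rw [pvAltLoop_eq]
  cases tasks.find? pvIsActive <;> cases tasks.find? pvIsPending <;> simp
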